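-- pv_equiv track=rewrite | github.com/r4d10n/esp32p4-wifi-rtlsdr | test/test_dtmf_loopback.py | circular_match
-- ===== SOURCE A (Python) =====
-- def circular_match(expected, detected):
--     """Find best circular alignment of detected within repeated expected.
--     TX is cyclic, so detected may start at any offset in the sequence."""
--     if not detected or not expected:
--         return 0, 0
--     doubled = expected * 3  # repeat to handle wrap-around
--     best_correct = 0
--     best_offset = 0
--     for offset in range(len(expected)):
--         correct = 0
--         for i, c in enumerate(detected):
--             if offset + i < len(doubled) and doubled[offset + i] == c:
--                 correct += 1
--             else:
--                 break  # stop at first mismatch for contiguous match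
--         if correct > best_correct:
--             best_correct = correct
--             best_offset = offset
--     return best_correct, best_offset
-- ===== SOURCE B (Python) =====
-- def circular_match(expected, detected):
--     """Z-algorithm: compute lcp of detected with every suffix of expected*3
--     in one linear pass, then pick the earliest maximum offset."""
--     if not detected or not expected:
--         return 0, 0
--     s = detected + "\0" + expected * 3
--     n = len(s)
--     z = [0] * n
--     l = r = 0
--     for i in range(1, n):
--         k = min(r - i, z[i - l]) if i < r else 0
--         while i + k < n and s[k] == s[i + k]:
--             k += 1
--         z[i] = k
--         if i + k > r:
--             l, r = i, i + k
--     d = len(detected)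
--     best_correct = 0
--     best_offset = 0
--     for offset in range(len(expected)):
--         c = z[d + 1 + offset]
--         if c > best_correct:
--             best_correct = c
--             best_offset = offset
--     return best_correct, best_offset
-- ===== Notes on version B (the rewrite author's own statement) =====
-- stated objective: faster
-- what changed: Replaced A's per-offset rescan of detected against expected*3 by a single Z-algorithm pass over detected + '\0' sentinel + expected*3, reading each offset's contiguous match length from the Z-array and taking the earliest maximum.
import Mathlib
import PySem

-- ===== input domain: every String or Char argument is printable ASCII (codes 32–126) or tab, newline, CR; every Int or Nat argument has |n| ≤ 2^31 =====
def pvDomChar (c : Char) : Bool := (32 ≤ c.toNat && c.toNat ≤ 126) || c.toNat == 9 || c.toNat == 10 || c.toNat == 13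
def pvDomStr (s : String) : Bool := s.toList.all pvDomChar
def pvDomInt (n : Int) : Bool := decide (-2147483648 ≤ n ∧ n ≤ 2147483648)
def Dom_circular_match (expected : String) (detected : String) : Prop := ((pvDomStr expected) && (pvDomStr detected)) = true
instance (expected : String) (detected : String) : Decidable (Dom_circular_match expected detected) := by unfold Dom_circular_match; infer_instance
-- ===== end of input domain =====

-- B replaces A's per-offset rescan of detected by a single Z-algorithm pass
-- over detected + sentinel + expected*3 (objective: faster, asymptotic).

-- ===== PORT A =====
-- inner loop of A: walks detected with index i, counting matches until the
-- first mismatch; 'doubled[offset+i]? = some c' is exactly Python's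
-- 'offset + i < len(doubled) and doubled[offset + i] == c'
def pvALoop (doubled : List Char) (offset : Nat) : List Char → Nat → Nat
  | [], _ => 0
  | c :: rest, i =>
    if doubled[offset + i]? = some c then pvALoop doubled offset rest (i + 1) + 1 else 0

def circular_match (expected : String) (detected : String) : List Int :=
  let e := expected.toList
  let d := detected.toList
  if d.isEmpty ∨ e.isEmpty then [0, 0]
  else
    let doubled := e ++ e ++ e
    let best := (List.range e.length).foldl
      (fun (st : Nat × Nat) offset =>
        let correct := pvALoop doubled offset d 0
        if st.1 < correct then (correct, offset) else st) (0, 0)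
    [(best.1 : Int), (best.2 : Int)]

-- ===== PORT B =====
-- B's 'while i + k < n and s[k] == s[i + k]: k += 1' loop
def pvZext (s : List Char) (i k : Nat) : Nat :=
  if i + k < s.length ∧ s.getD k ' ' = s.getD (i + k) ' ' then pvZext s i (k + 1) else k
termination_by s.length - (i + k)
decreasing_by omega

-- one iteration of B's 'for i in range(1, n)' loop; state st = (z, l, r)
def pvZstep (s : List Char) (st : List Nat × Nat × Nat) (i : Nat) : List Nat × Nat × Nat :=
  let k0 := if i < st.2.2 then min (st.2.2 - i) (st.1.getD (i - st.2.1) 0) else 0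
  let k := pvZext s i k0
  let z' := st.1.set i k
  if st.2.2 < i + k then (z', i, i + k) else (z', st.2.1, st.2.2)

-- B's Z-array: 'z = [0] * n; l = r = 0; for i in range(1, n): ...'
def pvZarr (s : List Char) : List Nat :=
  ((List.range' 1 (s.length - 1)).foldl (pvZstep s) (List.replicate s.length 0, 0, 0)).1

def circular_match_alt (expected : String) (detected : String) : List Int :=
  let e := expected.toList
  let d := detected.toList
  if d.isEmpty ∨ e.isEmpty then [0, 0]
  else
    let s := d ++ Char.ofNat 0 :: (e ++ e ++ e)
    let z := pvZarr s
    let best := (List.range e.length).foldl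
      (fun (st : Nat × Nat) offset =>
        let c := z.getD (d.length + 1 + offset) 0
        if st.1 < c then (c, offset) else st) (0, 0)
    [(best.1 : Int), (best.2 : Int)]

-- ===== PRECONDITION & SPEC =====
def Spec_circular_match (expected : String) (detected : String) (out : List Int) : Prop := out = circular_match_alt expected detected
instance (expected : String) (detected : String) (out : List Int) : Decidable (Spec_circular_match expected detected out) := by unfold Spec_circular_match; infer_instance

-- ===== CLAIM (what is proved, stated in full; the proofs are below) =====
def Claim_equal_circular_match : Prop := ∀ (expected : String) (detected : String), Dom_circular_match expected detected → Spec_circular_match expected detected (circular_match expected detected)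

-- ===== LEMMAS AND PROOFS =====

-- length of the longest common prefix of two lists
def pvLcp : List Char → List Char → Nat
  | a :: x, b :: y => if a = b then pvLcp x y + 1 else 0
  | _, _ => 0

theorem pvLcp_nil_right (x : List Char) : pvLcp x [] = 0 := by cases x <;> rfl

theorem pvLcp_nil_left (y : List Char) : pvLcp [] y = 0 := by cases y <;> rfl

theorem pvLcp_ge_iff (k : Nat) (x y : List Char) :
    k ≤ pvLcp x y ↔ ∀ t < k, ∃ c, x[t]? = some c ∧ y[t]? = some c := by
  induction x generalizing k y with
  | nil =>
    simp only [pvLcp_nil_left, Nat.le_zero, List.getElem?_nil]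
    constructor
    · rintro rfl t ht; omega
    · intro h
      by_contra hk
      obtain ⟨c, hc, -⟩ := h 0 (by omega)
      exact absurd hc (by simp)
  | cons a x ih =>
    cases y with
    | nil =>
      simp only [pvLcp_nil_right, Nat.le_zero, List.getElem?_nil]
      constructor
      · rintro rfl t ht; omega
      · intro h
        by_contra hk
        obtain ⟨c, -, hc⟩ := h 0 (by omega)
        exact absurd hc (by simp)
    | cons b y =>
      by_cases hab : a = b
      · subst hab
        simp only [pvLcp, if_true]
        cases k with
        | zero => simp
        | succ k =>
          rw [Nat.succ_le_succ_iff, ih k y]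
          constructor
          · intro h t ht
            cases t with
            | zero => exact ⟨a, by simp, by simp⟩
            | succ t =>
              obtain ⟨c, h1, h2⟩ := h t (by omega)
              exact ⟨c, by simpa using h1, by simpa using h2⟩
          · intro h t ht
            obtain ⟨c, h1, h2⟩ := h (t + 1) (by omega)
            exact ⟨c, by simpa using h1, by simpa using h2⟩
      · simp only [pvLcp, if_neg hab, Nat.le_zero]
        constructor
        · rintro rfl t ht; omega
        · intro h
          by_contra hk
          obtain ⟨c, h1, h2⟩ := h 0 (by omega)
          simp at h1 h2
          exact hab (h1.trans h2.symm)

theorem pvLcp_split (k : Nat) (x y : List Char) (h : k ≤ pvLcp x y) :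
    pvLcp x y = k + pvLcp (x.drop k) (y.drop k) := by
  induction k generalizing x y with
  | zero => simp
  | succ k ih =>
    cases x with
    | nil => simp [pvLcp_nil_left] at h
    | cons a x =>
      cases y with
      | nil => simp [pvLcp_nil_right] at h
      | cons b y =>
        by_cases hab : a = b
        · subst hab
          simp only [pvLcp, if_true] at h ⊢
          rw [List.drop_succ_cons, List.drop_succ_cons, ih x y (by omega)]
          omega
        · simp [pvLcp, if_neg hab] at h

theorem pvZext_eq (s : List Char) (i : Nat) : ∀ k,
    pvZext s i k = k + pvLcp (s.drop k) (s.drop (i + k)) := by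
  intro k
  induction k using pvZext.induct s i with
  | case1 k h ih =>
    rw [pvZext, if_pos h, ih]
    have hik : i + k < s.length := h.1
    have hk : k < s.length := by omega
    rw [List.drop_eq_getElem_cons hk, List.drop_eq_getElem_cons hik]
    have heq : s[k] = s[i + k] := by
      have := h.2
      rwa [List.getD_eq_getElem s ' ' hk, List.getD_eq_getElem s ' ' hik] at this
    simp only [pvLcp, if_pos heq, Nat.add_assoc]
    omega
  | case2 k h =>
    rw [pvZext, if_neg h]
    by_cases hik : i + k < s.length
    · have hk : k < s.length := by omega
      have hne : s[k] ≠ s[i + k] := by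
        intro hcon
        exact h ⟨hik, by rw [List.getD_eq_getElem s ' ' hk, List.getD_eq_getElem s ' ' hik, hcon]⟩
      rw [List.drop_eq_getElem_cons hk, List.drop_eq_getElem_cons hik]
      simp only [pvLcp, if_neg hne]
      omega
    · rw [List.drop_eq_nil_of_le (show s.length ≤ i + k by omega), pvLcp_nil_right]
      omega

theorem pvZext_lcp (s : List Char) (i k : Nat)
    (hk : k ≤ pvLcp s (s.drop i)) : pvZext s i k = pvLcp s (s.drop i) := by
  rw [pvZext_eq, pvLcp_split k s (s.drop i) hk, List.drop_drop]

theorem pvMinBound (s : List Char) (l i : Nat) (hli : l < i)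
    (hir : i < l + pvLcp s (s.drop l)) :
    min (l + pvLcp s (s.drop l) - i) (pvLcp s (s.drop (i - l))) ≤ pvLcp s (s.drop i) := by
  rw [pvLcp_ge_iff]
  intro t ht
  have h1 : t + 1 ≤ pvLcp s (s.drop (i - l)) := by omega
  obtain ⟨c, hc1, hc2⟩ := (pvLcp_ge_iff _ _ _).1 h1 t (by omega)
  rw [List.getElem?_drop] at hc2
  have h2 : (i - l) + t + 1 ≤ pvLcp s (s.drop l) := by omega
  obtain ⟨c', hc1', hc2'⟩ := (pvLcp_ge_iff _ _ _).1 h2 ((i - l) + t) (by omega)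
  rw [List.getElem?_drop] at hc2'
  refine ⟨c, hc1, ?_⟩
  rw [List.getElem?_drop]
  have hidx : l + (i - l + t) = i + t := by omega
  rw [hidx] at hc2'
  rw [hc2', ← hc1', hc2]

-- invariant of B's main loop before processing index i:
-- z is correct below i, and (l, r) is either still (0, 0) or a valid window
def pvZInv (s : List Char) (i : Nat) (st : List Nat × Nat × Nat) : Prop :=
  st.1.length = s.length ∧
  (∀ j, 1 ≤ j → j < i → st.1.getD j 0 = pvLcp s (s.drop j)) ∧
  ((st.2.1 = 0 ∧ st.2.2 = 0) ∨
    (1 ≤ st.2.1 ∧ st.2.1 < i ∧ st.2.2 = st.2.1 + pvLcp s (s.drop st.2.1)))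

theorem pvZstep_inv (s : List Char) (i : Nat) (st : List Nat × Nat × Nat)
    (h : pvZInv s i st) (hi : 1 ≤ i) (hn : i < s.length) :
    pvZInv s (i + 1) (pvZstep s st i) := by
  obtain ⟨hlen, hz, hlr⟩ := h
  have hk0 : (if i < st.2.2 then min (st.2.2 - i) (st.1.getD (i - st.2.1) 0) else 0)
      ≤ pvLcp s (s.drop i) := by
    by_cases hir : i < st.2.2
    · rw [if_pos hir]
      rcases hlr with ⟨-, hr0⟩ | ⟨hl1, hli, hr⟩
      · omega
      · rw [hz (i - st.2.1) (by omega) (by omega), hr]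
        exact pvMinBound s st.2.1 i hli (by omega)
    · rw [if_neg hir]; omega
  have hk : pvZext s i (if i < st.2.2 then min (st.2.2 - i) (st.1.getD (i - st.2.1) 0) else 0)
      = pvLcp s (s.drop i) := pvZext_lcp s i _ hk0
  simp only [pvZstep, hk]
  have hlen' : (st.1.set i (pvLcp s (s.drop i))).length = s.length := by
    rw [List.length_set]; exact hlen
  have hget : ∀ j, 1 ≤ j → j < i + 1 →
      (st.1.set i (pvLcp s (s.drop i))).getD j 0 = pvLcp s (s.drop j) := by
    intro j hj1 hj2
    rcases Nat.lt_or_ge j i with hji | hji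
    · rw [List.getD_eq_getElem?_getD, List.getElem?_set_ne (by omega),
        ← List.getD_eq_getElem?_getD]
      exact hz j hj1 hji
    · have : j = i := by omega
      subst this
      rw [List.getD_eq_getElem?_getD, List.getElem?_set_self (by omega)]
      rfl
  by_cases hbig : st.2.2 < i + pvLcp s (s.drop i)
  · rw [if_pos hbig]
    exact ⟨hlen', hget, Or.inr ⟨hi, Nat.lt_succ_self i, rfl⟩⟩
  · rw [if_neg hbig]
    refine ⟨hlen', hget, ?_⟩
    rcases hlr with hcase | ⟨hl1, hli, hr⟩
    · exact Or.inl hcase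
    · exact Or.inr ⟨hl1, Nat.lt_succ_of_lt hli, hr⟩

theorem pvZfold_inv (s : List Char) (cnt : Nat) : ∀ (start : Nat) st, 1 ≤ start →
    start + cnt ≤ s.length → pvZInv s start st →
    pvZInv s (start + cnt) ((List.range' start cnt).foldl (pvZstep s) st) := by
  induction cnt with
  | zero => intro start st _ _ h; simpa using h
  | succ cnt ih =>
    intro start st h1 h2 h
    rw [List.range'_succ, List.foldl_cons]
    have := ih (start + 1) (pvZstep s st start) (by omega) (by omega)
      (pvZstep_inv s start st h h1 (by omega))
    rwa [show start + (cnt + 1) = start + 1 + cnt by omega]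

theorem pvZarr_correct (s : List Char) (j : Nat) (h1 : 1 ≤ j) (hj : j < s.length) :
    (pvZarr s).getD j 0 = pvLcp s (s.drop j) := by
  have hinit : pvZInv s 1 (List.replicate s.length 0, 0, 0) :=
    ⟨List.length_replicate, fun j hj1 hj2 => by omega, Or.inl ⟨rfl, rfl⟩⟩
  have := pvZfold_inv s (s.length - 1) 1 (List.replicate s.length 0, 0, 0)
    (by omega) (by omega) hinit
  rw [show 1 + (s.length - 1) = s.length by omega] at this
  exact this.2.1 j h1 hj

-- a character absent from v stops the common prefix exactly at x
theorem pvLcp_sep (x u v : List Char) (c : Char) (hc : c ∉ v) :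
    pvLcp (x ++ c :: u) v = pvLcp x v := by
  induction x generalizing v with
  | nil =>
    cases v with
    | nil => simp [pvLcp_nil_right]
    | cons b v' =>
      have : c ≠ b := fun h => hc (h ▸ List.mem_cons_self ..)
      simp [pvLcp, this]
  | cons a x ih =>
    cases v with
    | nil => simp [pvLcp_nil_right]
    | cons b v' =>
      simp only [List.cons_append, pvLcp]
      split_ifs with hab
      · rw [ih v' (fun h => hc (List.mem_cons_of_mem _ h))]
      · rfl

-- A's inner loop computes the common prefix of detected and doubled[offset+i:]
theorem pvALoop_eq (doubled d : List Char) (offset : Nat) : ∀ i,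
    pvALoop doubled offset d i = pvLcp d (doubled.drop (offset + i)) := by
  induction d with
  | nil => intro i; simp [pvALoop, pvLcp_nil_left]
  | cons c rest ih =>
    intro i
    rcases hx : doubled[offset + i]? with - | b
    · have hge : doubled.length ≤ offset + i := by
        simpa [List.getElem?_eq_none_iff] using hx
      rw [List.drop_eq_nil_of_le hge, pvLcp_nil_right, pvALoop, if_neg (by simp [hx])]
    · have hlt : offset + i < doubled.length := by
        by_contra hge
        rw [List.getElem?_eq_none_iff.2 (by omega)] at hx; exact absurd hx (by simp)
      have hb : doubled[offset + i] = b := (List.getElem?_eq_some_iff.1 hx).2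
      rw [List.drop_eq_getElem_cons hlt, hb]
      by_cases hcb : b = c
      · subst hcb
        rw [pvALoop, if_pos (by rw [hx]), pvLcp, if_pos rfl, ih (i + 1),
          show offset + (i + 1) = offset + i + 1 by omega]
      · rw [pvALoop, if_neg (by simp [hx, hcb]), pvLcp, if_neg (fun h => hcb h.symm)]

-- ===== VERDICT (by name: the statement is the Claim_ definition above) =====
theorem circular_match_spec : Claim_equal_circular_match := by
  intro expected detected hdom
  show circular_match expected detected = circular_match_alt expected detected
  simp only [circular_match, circular_match_alt]
  by_cases hempty : detected.toList.isEmpty ∨ expected.toList.isEmpty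
  · rw [if_pos hempty, if_pos hempty]
  · rw [if_neg hempty, if_neg hempty]
    have hE : 0 < expected.toList.length := by
      rw [List.length_pos_iff]
      intro hnil
      exact hempty (Or.inr (by simp [hnil]))
    set e := expected.toList with he
    set d := detected.toList with hd
    set doubled := e ++ e ++ e with hdbl
    set s := d ++ Char.ofNat 0 :: doubled with hs
    have hsep : Char.ofNat 0 ∉ doubled := by
      intro hmem
      have hone : Char.ofNat 0 ∈ e := by
        rcases List.mem_append.1 hmem with h | h
        · rcases List.mem_append.1 h with h | h <;> exact h
        · exact h
      have hdom' : pvDomStr expected = true ∧ pvDomStr detected = true := by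
        simpa [Dom_circular_match, Bool.and_eq_true] using hdom
      have hall : ∀ c ∈ e, pvDomChar c = true := by
        simpa [pvDomStr, List.all_eq_true, he] using hdom'.1
      have := hall _ hone
      simp [pvDomChar] at this
    have hslen : s.length = d.length + 1 + doubled.length := by
      simp [hs]
      omega
    have hdlen : e.length ≤ doubled.length := by
      simp [hdbl]
    have hkey : ∀ (st : Nat × Nat), ∀ offset ∈ List.range e.length,
        (fun (st : Nat × Nat) offset =>
          if st.1 < pvALoop doubled offset d 0 then (pvALoop doubled offset d 0, offset) else st) st offset
        = (fun (st : Nat × Nat) offset =>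
          if st.1 < (pvZarr s).getD (d.length + 1 + offset) 0
          then ((pvZarr s).getD (d.length + 1 + offset) 0, offset) else st) st offset := by
      intro st offset hoff
      have hoff' : offset < e.length := List.mem_range.1 hoff
      have hdrop : s.drop (d.length + 1 + offset) = doubled.drop offset := by
        rw [hs, List.drop_append]
        rw [List.drop_eq_nil_of_le (show d.length ≤ d.length + 1 + offset by omega),
          show d.length + 1 + offset - d.length = offset + 1 by omega,
          List.drop_succ_cons, List.nil_append]
      have hv : pvALoop doubled offset d 0 = (pvZarr s).getD (d.length + 1 + offset) 0 := by
        rw [pvZarr_correct s (d.length + 1 + offset) (by omega) (by omega)]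
        rw [pvALoop_eq doubled d offset 0, Nat.add_zero, hdrop, hs,
          pvLcp_sep d doubled (doubled.drop offset) (Char.ofNat 0)
            (fun hmem => hsep (List.mem_of_mem_drop hmem))]
      dsimp only
      rw [hv]
    rw [PySem.List.foldl_congr_mem _ _ _ _ hkey]
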